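-- pv_equiv track=rewrite | github.com/xoellijo/pnpink | src/text.py | _escape_text_nodes_only
-- ===== SOURCE A (Python) =====
-- def _escape_text_nodes_only(s: str) -> str:
--     """Escapa solo el texto fuera de etiquetas XML (<tspan>, etc.), para que sea XML válido.
--
--     - De momento solo escapa '&' que no forma parte de una entidad (&amp;, &#123;, etc.).
--     - Las etiquetas generadas por snippets se mantienen intactas.
--     """
--     out = []
--     inside_tag = False
--     i = 0
--     n = len(s)
--
--     while i < n:
--         ch = s[i]
--         if ch == "<":
--             inside_tag = True
--             out.append(ch)
--             i += 1
--             continue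
--         if ch == ">":
--             inside_tag = False
--             out.append(ch)
--             i += 1
--             continue
--
--         if inside_tag:
--             out.append(ch)
--             i += 1
--             continue
--
--         # Fuera de etiqueta: vigilar '&' sueltos
--         if ch == "&":
--             j = i + 1
--             # Buscar hasta ';' o separador
--             while j < n and s[j] not in " \t\r\n<>":
--                 if s[j] == ";":
--                     break
--                 j += 1
--
--             if j < n and s[j] == ";" and j > i + 1:
--                 body = s[i+1:j]
--                 # Entidades: &amp;  &nombre;  &#123;  &#x1F60A;
--                 if body[0].isalpha() or (body[0] == "#" and len(body) > 1):
--                     out.append(s[i:j+1])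
--                     i = j + 1
--                     continue
--
--             # No parece una entidad → escapar
--             out.append("&amp;")
--             i += 1
--             continue
--
--         out.append(ch)
--         i += 1
--
--     return "".join(out)
-- ===== SOURCE B (Python) =====
-- def _escape_text_nodes_only(s: str) -> str:
--     # Precompute, right-to-left, the first stop position (" \t\r\n<>;") at or
--     # after each index, then emit the string in chunks: whole tags, whole
--     # entities, and maximal plain runs. O(n) with no rescanning.
--     n = len(s)
--     nxt = [n] * (n + 1)
--     for i in range(n - 1, -1, -1):
--         nxt[i] = i if s[i] in " \t\r\n<>;" else nxt[i + 1]
--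
--     out = []
--     i = 0
--     inside = False
--     while i < n:
--         if inside:
--             f = s.find(">", i)
--             k = n if f == -1 else f + 1
--             out.append(s[i:k])
--             inside = False
--             i = k
--         elif s[i] == "<":
--             out.append("<")
--             inside = True
--             i += 1
--         elif s[i] == "&":
--             j = nxt[i + 1]
--             if (j < n and s[j] == ";" and j > i + 1
--                     and (s[i + 1].isalpha() or (s[i + 1] == "#" and j > i + 2))):
--                 out.append(s[i:j + 1])
--                 i = j + 1
--             else:
--                 out.append("&amp;")
--                 i += 1
--         else:
--             a = s.find("<", i)
--             b = s.find("&", i)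
--             k = min(x for x in (a, b) if x != -1) if (a != -1 or b != -1) else n
--             out.append(s[i:k])
--             i = k
--     return "".join(out)
-- ===== Notes on version B (the rewrite author's own statement) =====
-- stated objective: faster
-- what changed: B precomputes in one right-to-left pass a table of the next separator-or-semicolon position after each index, so the per-ampersand inner rescan disappears, and it emits tags and plain-text runs as whole chunks located with str.find instead of appending char by char.
import Mathlib
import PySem

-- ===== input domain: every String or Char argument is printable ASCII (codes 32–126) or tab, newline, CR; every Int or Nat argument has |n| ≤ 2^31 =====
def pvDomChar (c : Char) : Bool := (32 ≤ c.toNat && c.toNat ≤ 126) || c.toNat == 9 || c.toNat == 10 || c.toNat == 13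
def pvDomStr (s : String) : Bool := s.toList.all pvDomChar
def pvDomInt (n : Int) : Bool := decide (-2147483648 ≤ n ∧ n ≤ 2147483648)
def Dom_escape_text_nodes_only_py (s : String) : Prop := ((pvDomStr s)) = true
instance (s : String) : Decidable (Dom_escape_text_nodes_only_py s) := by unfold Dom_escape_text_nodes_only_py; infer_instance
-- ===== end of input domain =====

-- B replaces A's per-'&' inner rescans by a precomputed next-stop table and emits
-- tags and plain text in whole chunks: a single-pass O(n) alternative (A is O(n^2)
-- on '&' runs).  Same return value on every input.

-- ===== PORT A =====
-- separator set " \t\r\n<>" of A's inner while loop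
def pvSep (c : Char) : Bool :=
  c == ' ' || c == '\t' || c == '\r' || c == '\n' || c == '<' || c == '>'

-- A's inner while: advance j until a separator or ';' (or end of string)
def pvAScan (s : List Char) (j : Nat) : Nat :=
  if h : j < s.length then
    if pvSep s[j] then j
    else if s[j] == ';' then j
    else pvAScan s (j + 1)
  else j
termination_by s.length - j

-- needed by pvALoop's termination proof
theorem pvAScan_ge (s : List Char) (j : Nat) : j ≤ pvAScan s j := by
  unfold pvAScan
  split
  · split
    · exact le_refl _
    · split
      · exact le_refl _
      · exact Nat.le_trans (Nat.le_succ j) (pvAScan_ge s (j + 1))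
  · exact le_refl _
termination_by s.length - j

-- A's main while loop, step for step (branch order preserved)
def pvALoop (s : List Char) (i : Nat) (inside : Bool) (acc : List Char) : List Char :=
  if h : i < s.length then
    let ch := s[i]
    if ch == '<' then pvALoop s (i + 1) true (acc ++ [ch])
    else if ch == '>' then pvALoop s (i + 1) false (acc ++ [ch])
    else if inside then pvALoop s (i + 1) inside (acc ++ [ch])
    else if ch == '&' then
      let j := pvAScan s (i + 1)
      let body := PySem.List.slice s (some ((i + 1 : Nat) : Int)) (some ((j : Nat) : Int))
      -- Python's nested 'if … : if … : continue' then fall-through to append '&amp;'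
      if (decide (j < s.length) && (s.getD j ' ' == ';') && decide (i + 1 < j))
          && (PySem.Chars.isalpha (PySem.List.pyGetD body 0 ' ')
              || ((PySem.List.pyGetD body 0 ' ' == '#') && decide (1 < body.length))) then
        pvALoop s (j + 1) inside
          (acc ++ PySem.List.slice s (some ((i : Nat) : Int)) (some ((j + 1 : Nat) : Int)))
      else pvALoop s (i + 1) inside (acc ++ "&amp;".toList)
    else pvALoop s (i + 1) inside (acc ++ [ch])
  else acc
termination_by s.length - i
decreasing_by
  · omega
  · omega
  · omega
  · have := pvAScan_ge s (i + 1); omega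
  · omega
  · omega

def escape_text_nodes_only_py (s : String) : String :=
  String.ofList (pvALoop s.toList 0 false [])

-- ===== PORT B =====
-- the stop set " \t\r\n<>;" of B's precomputed table
def pvStop (c : Char) : Bool :=
  c == ' ' || c == '\t' || c == '\r' || c == '\n' || c == '<' || c == '>' || c == ';'

-- B's right-to-left fill of nxt: returns the list [nxt[i], …, nxt[n]]
def pvNxt (s : List Char) (i : Nat) : List Nat :=
  if h : i < s.length then
    let rest := pvNxt s (i + 1)
    (if pvStop s[i] then i else rest.headD s.length) :: rest
  else [s.length]
termination_by s.length + 1 - i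

-- str.find(c, i): first index ≥ i holding c, else -1
def pvFind (s : List Char) (c : Char) (i : Nat) : Int :=
  if h : i < s.length then
    if s[i] == c then (i : Int) else pvFind s c (i + 1)
  else -1
termination_by s.length - i

-- k = n if s.find('>', i) == -1 else find+1   (end of the current tag chunk)
def pvTagEnd (s : List Char) (i : Nat) : Nat :=
  if pvFind s '>' i = -1 then s.length else (pvFind s '>' i).toNat + 1

-- k = min of the finds of '<' and '&' (n if both -1)  (end of the plain-text chunk)
def pvRunEnd (s : List Char) (i : Nat) : Nat :=
  if pvFind s '<' i = -1 && pvFind s '&' i = -1 then s.length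
  else if pvFind s '<' i = -1 then (pvFind s '&' i).toNat
  else if pvFind s '&' i = -1 then (pvFind s '<' i).toNat
  else min (pvFind s '<' i).toNat (pvFind s '&' i).toNat

-- bounds used by pvBLoop's termination proof
theorem pvFind_lb (s : List Char) (c : Char) (i : Nat) :
    pvFind s c i = -1 ∨ (i ≤ (pvFind s c i).toNat ∧ (pvFind s c i).toNat < s.length) := by
  unfold pvFind
  split
  · split
    · right; simp; omega
    · rcases pvFind_lb s c (i + 1) with h | h
      · left; exact h
      · right; omega
  · left; rfl
termination_by s.length - i

theorem pvTagEnd_gt (s : List Char) (i : Nat) (h : i < s.length) :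
    i < pvTagEnd s i ∧ pvTagEnd s i ≤ s.length := by
  unfold pvTagEnd
  split_ifs with hf
  · exact ⟨h, le_refl _⟩
  · rcases pvFind_lb s '>' i with h1 | h1
    · exact absurd h1 hf
    · omega

theorem pvFind_self_ne (s : List Char) (c : Char) (i : Nat) (h : i < s.length)
    (hne : ¬ s[i] == c) : pvFind s c i = pvFind s c (i + 1) := by
  conv_lhs => rw [pvFind]
  simp only [h, dif_pos]
  rw [if_neg hne]

theorem pvRunEnd_gt (s : List Char) (i : Nat) (h : i < s.length)
    (h1 : ¬ s[i] == '<') (h2 : ¬ s[i] == '&') :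
    i < pvRunEnd s i ∧ pvRunEnd s i ≤ s.length := by
  unfold pvRunEnd
  rw [pvFind_self_ne s '<' i h h1, pvFind_self_ne s '&' i h h2]
  have ha := pvFind_lb s '<' (i + 1)
  have hb := pvFind_lb s '&' (i + 1)
  split_ifs with g1 g2 g3 <;> simp_all <;> omega

-- B's main loop: chunked emission (tag chunk / entity / escaped '&' / plain run)
def pvBLoop (s : List Char) (nxt : List Nat) (i : Nat) (inside : Bool) (acc : List Char) :
    List Char :=
  if h : i < s.length then
    if inside then
      let k := pvTagEnd s i
      pvBLoop s nxt k false (acc ++ (s.drop i).take (k - i))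
    else if s[i] == '<' then
      pvBLoop s nxt (i + 1) true (acc ++ ['<'])
    else if s[i] == '&' then
      let j := nxt.getD (i + 1) s.length
      if (decide (j < s.length) && (s.getD j ' ' == ';') && decide (i + 1 < j))
          && (PySem.Chars.isalpha (s.getD (i + 1) ' ')
              || ((s.getD (i + 1) ' ' == '#') && decide (i + 2 < j))) then
        pvBLoop s nxt (j + 1) inside (acc ++ (s.drop i).take (j + 1 - i))
      else pvBLoop s nxt (i + 1) inside (acc ++ "&amp;".toList)
    else
      let k := pvRunEnd s i
      pvBLoop s nxt k inside (acc ++ (s.drop i).take (k - i))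
  else acc
termination_by s.length - i
decreasing_by
  · have := pvTagEnd_gt s i h; omega
  · omega
  · rename_i hc
    simp only [Bool.and_eq_true, decide_eq_true_eq] at hc
    omega
  · omega
  · have := pvRunEnd_gt s i h (by assumption) (by assumption); omega

def escape_text_nodes_only_py_alt (s : String) : String :=
  String.ofList (pvBLoop s.toList (pvNxt s.toList 0) 0 false [])

-- ===== PRECONDITION & SPEC =====
def Spec_escape_text_nodes_only_py (s : String) (out : String) : Prop := out = escape_text_nodes_only_py_alt s
instance (s : String) (out : String) : Decidable (Spec_escape_text_nodes_only_py s out) := by unfold Spec_escape_text_nodes_only_py; infer_instance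

-- ===== CLAIM (what is proved, stated in full; the proofs are below) =====
def Claim_equal_escape_text_nodes_only_py : Prop := ∀ (s : String), Dom_escape_text_nodes_only_py s → Spec_escape_text_nodes_only_py s (escape_text_nodes_only_py s)

-- ===== LEMMAS AND PROOFS =====

theorem pvStop_eq (c : Char) : pvStop c = (pvSep c || (c == ';')) := rfl

-- one unfolding step of the inner scan, phrased with the stop set
theorem pvAScan_step (s : List Char) (i : Nat) (h : i < s.length) :
    pvAScan s i = if pvStop s[i] then i else pvAScan s (i + 1) := by
  rw [pvAScan, dif_pos h, pvStop_eq]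
  cases hsep : pvSep s[i] <;> cases hsemi : (s[i] == ';') <;> simp

theorem headD_eq_getD {α : Type} (l : List α) (d : α) : l.headD d = l.getD 0 d := by
  cases l <;> rfl

-- B's table entry k equals A's inner scan started at k
theorem pvNxt_getD (s : List Char) (i k : Nat) (hik : i ≤ k) (hk : k ≤ s.length) :
    (pvNxt s i).getD (k - i) s.length = pvAScan s k := by
  rw [pvNxt]
  split
  · rename_i h
    rcases Nat.eq_or_lt_of_le hik with rfl | hlt
    · simp only [Nat.sub_self, List.getD_cons_zero]
      rw [pvAScan_step s i h, headD_eq_getD]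
      have hrec := pvNxt_getD s (i + 1) (i + 1) (le_refl _) (by omega)
      simp only [Nat.sub_self] at hrec
      rw [hrec]
    · have hs : k - i = (k - (i + 1)) + 1 := by omega
      rw [hs]
      simp only [List.getD_cons_succ]
      exact pvNxt_getD s (i + 1) k (by omega) hk
  · rename_i h
    have hik2 : k = i := by omega
    subst hik2
    rw [pvAScan, dif_neg h]
    simp only [Nat.sub_self, List.getD_cons_zero]
    omega
termination_by s.length + 1 - i

theorem pvFind_notin (s : List Char) (c : Char) (i : Nat) (hf : pvFind s c i = -1)
    (t : Nat) (ht : t < s.length) (hit : i ≤ t) : s[t] ≠ c := by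
  rw [pvFind] at hf
  split at hf
  · rename_i h
    split at hf
    · exact absurd hf (by simp)
    · rename_i hne
      rcases Nat.eq_or_lt_of_le hit with rfl | hlt
      · simpa using hne
      · exact pvFind_notin s c (i + 1) hf t ht hlt
  · rename_i h; omega
termination_by s.length - i

theorem pvFind_found (s : List Char) (c : Char) (i : Nat) (hf : pvFind s c i ≠ -1) :
    ∃ m : Nat, pvFind s c i = (m : Int) ∧ i ≤ m ∧ ∃ hm : m < s.length,
      s[m] = c ∧ ∀ t (ht : t < s.length), i ≤ t → t < m → s[t] ≠ c := by
  rw [pvFind] at hf ⊢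
  split at hf
  · rename_i h
    split at hf
    · rename_i heq
      refine ⟨i, by simp [h, heq], le_refl _, h, by simpa using heq, ?_⟩
      intro t ht h1 h2; omega
    · rename_i hne
      obtain ⟨m, hm1, hm2, hm3, hm4, hm5⟩ := pvFind_found s c (i + 1) hf
      refine ⟨m, by simp [h, hne, hm1], by omega, hm3, hm4, ?_⟩
      intro t ht h1 h2
      rcases Nat.eq_or_lt_of_le h1 with rfl | hlt
      · simpa using hne
      · exact hm5 t ht hlt h2
  · exact absurd rfl hf
termination_by s.length - i

theorem take_cons_drop (s : List Char) (i m : Nat) (h : i < s.length) (hm : 1 ≤ m) :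
    (s.drop i).take m = s[i] :: (s.drop (i + 1)).take (m - 1) := by
  cases m with
  | zero => omega
  | succ m' => rw [List.drop_eq_getElem_cons h, List.take_succ_cons, Nat.add_sub_cancel]

-- inside a tag, A copies char by char exactly the chunk B copies at once
theorem pvA_tagrun (s : List Char) (i : Nat) (hi : i ≤ s.length) (acc : List Char) :
    pvALoop s i true acc
      = pvALoop s (pvTagEnd s i) false (acc ++ (s.drop i).take (pvTagEnd s i - i)) := by
  rcases Nat.eq_or_lt_of_le hi with rfl | h
  · have hf : pvFind s '>' s.length = -1 := by rw [pvFind]; simp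
    rw [pvTagEnd, hf]
    simp
    rw [pvALoop, dif_neg (by omega), pvALoop, dif_neg (by omega)]
  · by_cases hgt : s[i] == '>'
    · have hf : pvFind s '>' i = (i : Int) := by rw [pvFind]; simp [h, hgt]
      have hk : pvTagEnd s i = i + 1 := by rw [pvTagEnd, hf]; simp
      rw [hk]
      conv_lhs => rw [pvALoop]
      have hlt : ¬ (s[i] == '<') = true := by
        simp at hgt ⊢; rw [hgt]; decide
      simp only [dif_pos h, hlt, Bool.false_eq_true, if_false, hgt, if_true]
      have e : i + 1 - i = 1 := by omega
      rw [e, take_cons_drop s i 1 h (le_refl _)]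
      simp
    · have hf : pvFind s '>' i = pvFind s '>' (i + 1) := pvFind_self_ne s '>' i h hgt
      have hk : pvTagEnd s i = pvTagEnd s (i + 1) := by rw [pvTagEnd, pvTagEnd, hf]
      have hk1 : i + 1 ≤ pvTagEnd s (i + 1) := by
        rw [pvTagEnd]
        split
        · omega
        · rename_i hne
          obtain ⟨m, hm1, hm2, _, _, _⟩ := pvFind_found s '>' (i + 1) hne
          rw [hm1]; simp; omega
      have step : pvALoop s i true acc = pvALoop s (i + 1) true (acc ++ [s[i]]) := by
        conv_lhs => rw [pvALoop]
        simp only [dif_pos h]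
        by_cases hlt : s[i] == '<' <;> simp [hlt, hgt]
      rw [step, pvA_tagrun s (i + 1) (by omega) (acc ++ [s[i]]), hk]
      rw [take_cons_drop s i (pvTagEnd s (i + 1) - i) h (by omega)]
      have : pvTagEnd s (i + 1) - i - 1 = pvTagEnd s (i + 1) - (i + 1) := by omega
      rw [this]
      simp
termination_by s.length - i
decreasing_by omega

-- outside tags, a run without '<' and '&' is copied char by char = as one chunk
theorem pvA_plainrun (s : List Char) (i k : Nat) (hik : i ≤ k) (hk : k ≤ s.length)
    (hrun : ∀ t (ht : t < s.length), i ≤ t → t < k → s[t] ≠ '<' ∧ s[t] ≠ '&')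
    (acc : List Char) :
    pvALoop s i false acc = pvALoop s k false (acc ++ (s.drop i).take (k - i)) := by
  rcases Nat.eq_or_lt_of_le hik with rfl | hlt
  · simp
  · have h : i < s.length := by omega
    have hne := hrun i h (le_refl _) hlt
    have step : pvALoop s i false acc = pvALoop s (i + 1) false (acc ++ [s[i]]) := by
      conv_lhs => rw [pvALoop]
      simp only [dif_pos h]
      have h1 : ¬ (s[i] == '<') = true := by simpa using hne.1
      have h2 : ¬ (s[i] == '&') = true := by simpa using hne.2
      by_cases h3 : s[i] == '>' <;> simp [h1, h2, h3]
    rw [step, pvA_plainrun s (i + 1) k hlt hk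
      (fun t ht h1 h2 => hrun t ht (by omega) h2) (acc ++ [s[i]])]
    rw [take_cons_drop s i (k - i) h (by omega)]
    have : k - i - 1 = k - (i + 1) := by omega
    rw [this]
    simp
termination_by k - i

theorem pv_main_aux (s : List Char) (d : Nat) :
    ∀ (i : Nat) (inside : Bool) (acc : List Char), i ≤ s.length → s.length - i ≤ d →
      pvALoop s i inside acc = pvBLoop s (pvNxt s 0) i inside acc := by
  induction d with
  | zero =>
    intro i inside acc hi hd
    have hie : ¬ i < s.length := by omega
    rw [pvALoop, dif_neg hie, pvBLoop, dif_neg hie]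
  | succ d ih =>
    intro i inside acc hi hd
    rw [pvBLoop]
    split
    case isFalse h => rw [pvALoop, dif_neg h]
    case isTrue h =>
      cases inside with
      | true =>
        simp only [if_true]
        rw [pvA_tagrun s i hi acc]
        have hk := pvTagEnd_gt s i h
        exact ih (pvTagEnd s i) false _ hk.2 (by omega)
      | false =>
        simp only [Bool.false_eq_true, if_false]
        by_cases h1 : s[i] == '<'
        · simp only [h1, if_true]
          conv_lhs => rw [pvALoop]
          simp only [dif_pos h, h1, if_true]
          have he : s[i] = '<' := by simpa using h1
          rw [he]
          exact ih (i + 1) true _ (by omega) (by omega)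
        · by_cases h2 : s[i] == '&'
          · simp only [h1, Bool.false_eq_true, if_false, h2, if_true]
            conv_lhs => rw [pvALoop]
            have h3 : ¬ (s[i] == '>') = true := by
              simp at h2 ⊢; rw [h2]; decide
            simp only [dif_pos h, h1, h3, Bool.false_eq_true, if_false, h2, if_true]
            have hj : (pvNxt s 0).getD (i + 1) s.length = pvAScan s (i + 1) := by
              have := pvNxt_getD s 0 (i + 1) (by omega) (by omega)
              simpa using this
            rw [hj]
            set j := pvAScan s (i + 1) with hjdef
            by_cases hX : (decide (j < s.length) && (s.getD j ' ' == ';')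
                && decide (i + 1 < j)) = true
            · have hXA := hX
              simp only [Bool.and_eq_true, decide_eq_true_eq] at hX
              obtain ⟨⟨hjn, hsemi⟩, hij⟩ := hX
              have hbody : PySem.List.slice s (some ((i + 1 : Nat) : Int)) (some ((j : Nat) : Int))
                  = s[i + 1]'(by omega) :: (s.drop (i + 2)).take (j - (i + 2)) := by
                rw [PySem.List.slice_natCast]
                rw [take_cons_drop s (i + 1) (j - (i + 1)) (by omega) (by omega)]
                have e1 : j - (i + 1) - 1 = j - (i + 2) := by omega
                have e2 : i + 1 + 1 = i + 2 := by omega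
                rw [e1, e2]
              have hgd : s.getD (i + 1) ' ' = s[i + 1]'(by omega) := by
                rw [List.getD_eq_getElem _ _ (by omega)]
              have hlen : (PySem.List.slice s (some ((i + 1 : Nat) : Int))
                  (some ((j : Nat) : Int))).length = j - (i + 1) := by
                rw [PySem.List.slice_natCast, List.length_take, List.length_drop]
                omega
              rw [PySem.List.pyGetD_zero, hbody]
              simp only [List.getD_cons_zero]
              have hlen2 : decide (1 < (PySem.List.slice s (some ((i + 1 : Nat) : Int))
                  (some ((j : Nat) : Int))).length) = decide (i + 2 < j) := by
                rw [hlen]; simp; omega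
              rw [← hbody, hXA, hlen2, ← hgd]
              by_cases hY : (PySem.Chars.isalpha (s.getD (i + 1) ' ')
                  || ((s.getD (i + 1) ' ' == '#') && decide (i + 2 < j))) = true
              · simp only [hY, Bool.true_and, if_true]
                rw [PySem.List.slice_natCast]
                exact ih (j + 1) false _ (by omega) (by omega)
              · simp only [hY, Bool.true_and, Bool.false_eq_true, if_false]
                exact ih (i + 1) false _ (by omega) (by omega)
            · have hXf : (decide (j < s.length) && (s.getD j ' ' == ';')
                  && decide (i + 1 < j)) = false := by
                simpa using hX
              rw [hXf]
              simp only [Bool.false_and, Bool.false_eq_true, if_false]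
              exact ih (i + 1) false _ (by omega) (by omega)
          · -- plain run
            simp only [h1, h2, Bool.false_eq_true, if_false]
            have hk := pvRunEnd_gt s i h h1 h2
            have hrun : ∀ t (ht : t < s.length), i ≤ t → t < pvRunEnd s i →
                s[t] ≠ '<' ∧ s[t] ≠ '&' := by
              intro t ht hit htk
              rw [pvRunEnd] at htk
              constructor
              · by_cases ha : pvFind s '<' i = -1
                · exact pvFind_notin s '<' i ha t ht hit
                · obtain ⟨m, hm1, hm2, hm3, hm4, hm5⟩ := pvFind_found s '<' i ha
                  apply hm5 t ht hit
                  split_ifs at htk <;> simp_all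
              · by_cases hb : pvFind s '&' i = -1
                · exact pvFind_notin s '&' i hb t ht hit
                · obtain ⟨m, hm1, hm2, hm3, hm4, hm5⟩ := pvFind_found s '&' i hb
                  apply hm5 t ht hit
                  split_ifs at htk <;> simp_all
            rw [pvA_plainrun s i (pvRunEnd s i) (by omega) hk.2 hrun acc]
            exact ih (pvRunEnd s i) false _ hk.2 (by omega)

theorem pv_main (s : List Char) (i : Nat) (inside : Bool) (acc : List Char)
    (hi : i ≤ s.length) :
    pvALoop s i inside acc = pvBLoop s (pvNxt s 0) i inside acc :=
  pv_main_aux s (s.length - i) i inside acc hi (le_refl _)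

-- ===== VERDICT (by name: the statement is the Claim_ definition above) =====
theorem escape_text_nodes_only_py_spec : Claim_equal_escape_text_nodes_only_py := by
  intro s _
  unfold Spec_escape_text_nodes_only_py escape_text_nodes_only_py escape_text_nodes_only_py_alt
  rw [pv_main s.toList 0 false [] (Nat.zero_le _)]
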